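-- pv_equiv track=rewrite | github.com/ayushgupta-repo/MyDataStructureInPython | Problems/XORQuery.py | xorQuery
-- ===== SOURCE A (Python) =====
-- def xorQuery(queries):
--     # Write your code here.
--     operated_arr = []
--     for each_query in queries:
--         if each_query[0] == 1:
--             operated_arr.append(each_query[1])
--         elif each_query[0] == 2:
--             for i in range(len(operated_arr)):
--                 operated_arr[i] = operated_arr[i] ^ each_query[1]
--
--     return operated_arr
-- ===== SOURCE B (Python) =====
-- def xorQuery(queries):
--     # Single backward pass: walk queries from the end keeping the suffix XOR of all
--     # type-2 values; each type-1 value is emitted already combined with exactly the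
--     # type-2 XORs that come after it. Reverse the collected outputs at the end.
--     suf = 0
--     out = []
--     for q in reversed(queries):
--         if q[0] == 2:
--             suf = q[1] ^ suf
--         elif q[0] == 1:
--             out.append(q[1] ^ suf)
--     out.reverse()
--     return out
-- ===== Notes on version B (the rewrite author's own statement) =====
-- stated objective: alternative
-- what changed: Replaces A's forward loop with an inner per-element XOR pass on every type-2 query by a single backward pass that keeps the suffix XOR of type-2 values and emits each type-1 value once, reversing the output at the end.
-- outside the precondition, e.g. on xorQuery([[2]]): A returns [], B raises IndexError
import Mathlib
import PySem

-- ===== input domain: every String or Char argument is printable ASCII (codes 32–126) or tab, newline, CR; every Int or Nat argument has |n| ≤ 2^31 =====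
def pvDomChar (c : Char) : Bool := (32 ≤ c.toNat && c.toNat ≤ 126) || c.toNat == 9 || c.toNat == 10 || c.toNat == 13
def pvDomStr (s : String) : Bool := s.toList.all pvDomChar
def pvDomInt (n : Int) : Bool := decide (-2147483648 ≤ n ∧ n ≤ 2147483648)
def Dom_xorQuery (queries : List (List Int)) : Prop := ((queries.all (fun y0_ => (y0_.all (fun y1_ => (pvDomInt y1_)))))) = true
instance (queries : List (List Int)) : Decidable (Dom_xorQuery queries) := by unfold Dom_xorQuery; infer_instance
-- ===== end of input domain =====

-- B replaces A's forward loop (per-element XOR pass on every type-2 query) by a single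
-- backward pass keeping the suffix XOR of type-2 values and emitting each type-1 value once.


-- ===== PORT A =====
-- one iteration of A's loop body (pyGet? = none is where the Python raises; excluded by Pre_)
def pvStepA (arr : List Int) (q : List Int) : List Int :=
  match PySem.List.pyGet? q 0 with
  | none => arr
  | some op =>
    if op = 1 then
      match PySem.List.pyGet? q 1 with
      | none => arr
      | some v => arr ++ [v]
    else if op = 2 then
      match PySem.List.pyGet? q 1 with
      | none => arr
      | some v => arr.map (fun a => PySem.Int.bxor a v)
    else arr

def xorQuery (queries : List (List Int)) : List Int :=
  queries.foldl pvStepA []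

-- ===== PORT B =====
-- one iteration of B's reversed loop over the state (suf, out); when q = [] Python's q[0]
-- raises IndexError and when op ∈ {1,2} with no second element q[1] raises — both outside
-- Pre_, where headD 0 is only a placeholder.
def pvRevStep (s : Int × List Int) (q : List Int) : Int × List Int :=
  match q with
  | [] => s
  | op :: rest =>
    if op = 2 then (PySem.Int.bxor (rest.headD 0) s.1, s.2)
    else if op = 1 then (s.1, s.2 ++ [PySem.Int.bxor (rest.headD 0) s.1])
    else s

def xorQuery_alt (queries : List (List Int)) : List Int :=
  ((queries.reverse.foldl pvRevStep (0, [])).2).reverse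

-- ===== PRECONDITION & SPEC =====
-- Pre_ excludes queries that are empty (q[0] raises IndexError in A) or of type 1/2 without a
-- second element: there A's q[1] raises, except that A silently skips a short type-2 query while
-- the list is still empty (its inner loop runs zero times) — a defensible-corner artefact of A's
-- loop that B's backward pass (which always reads a type-2 query's q[1]) raises on, so those
-- inputs stay outside Pre_.
def Pre_xorQuery (queries : List (List Int)) : Prop :=
  ∀ q ∈ queries, q ≠ [] ∧ ((q.headD 0 = 1 ∨ q.headD 0 = 2) → 2 ≤ q.length)
instance (queries : List (List Int)) : Decidable (Pre_xorQuery queries) := by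
  unfold Pre_xorQuery; infer_instance

def pvWitness_xorQuery : List (List Int) := [[1, 5], [1, 7], [2, 3], [1, 4], [2, 6]]

def Spec_xorQuery (queries : List (List Int)) (out : List Int) : Prop := out = xorQuery_alt queries
instance (queries : List (List Int)) (out : List Int) : Decidable (Spec_xorQuery queries out) := by unfold Spec_xorQuery; infer_instance

-- ===== CLAIM (what is proved, stated in full; the proofs are below) =====
def Claim_equal_xorQuery : Prop := ∀ (queries : List (List Int)), Dom_xorQuery queries → Pre_xorQuery queries → Spec_xorQuery queries (xorQuery queries)

-- ===== LEMMAS AND PROOFS =====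

-- sign/magnitude encoding of an Int used to reason about PySem.Int.bxor
def pvDec (s : Bool) (n : Nat) : Int := if s then -(n : Int) - 1 else (n : Int)
def pvSign (a : Int) : Bool := decide (a < 0)
def pvCode (a : Int) : Nat := if a < 0 then (-a).toNat - 1 else a.toNat

lemma pv_bxor_eq_dec (a b : Int) :
    PySem.Int.bxor a b = pvDec (pvSign a ^^ pvSign b) (pvCode a ^^^ pvCode b) := by
  unfold PySem.Int.bxor pvDec pvSign pvCode
  rcases a with m | m <;> rcases b with n | n <;>
    simp [Int.negSucc_lt_zero, Int.negSucc_not_nonneg, Int.neg_negSucc] <;>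
    split_ifs <;> simp_all <;> omega

lemma pv_sign_dec (s : Bool) (n : Nat) : pvSign (pvDec s n) = s := by
  cases s <;> unfold pvSign pvDec <;> simp <;> omega

lemma pv_code_dec (s : Bool) (n : Nat) : pvCode (pvDec s n) = n := by
  cases s <;> unfold pvCode pvDec <;> simp <;> split_ifs <;> omega

lemma pv_bxor_assoc (a x v : Int) :
    PySem.Int.bxor (PySem.Int.bxor a x) v = PySem.Int.bxor a (PySem.Int.bxor x v) := by
  rw [pv_bxor_eq_dec a x, pv_bxor_eq_dec x v, pv_bxor_eq_dec _ v, pv_bxor_eq_dec a _,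
    pv_sign_dec, pv_code_dec, pv_sign_dec, pv_code_dec, Bool.xor_assoc, Nat.xor_assoc]

-- the invariant: A's forward fold equals the pending suffix XOR applied to the start state
-- followed by B's (reversed) collected outputs, where B's state over the suffix qs is
-- qs.foldr (fun q s => pvRevStep s q) (0, [])
lemma pv_inv (qs : List (List Int)) : ∀ (arr : List Int),
    (∀ q ∈ qs, q ≠ [] ∧ ((q.headD 0 = 1 ∨ q.headD 0 = 2) → 2 ≤ q.length)) →
    qs.foldl pvStepA arr =
      arr.map (fun a => PySem.Int.bxor a (qs.foldr (fun q s => pvRevStep s q) (0, [])).1)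
        ++ ((qs.foldr (fun q s => pvRevStep s q) (0, [])).2).reverse := by
  induction qs with
  | nil => intro arr _; simp
  | cons q qs ih =>
    intro arr h
    obtain ⟨hq, hlen⟩ := h q (List.mem_cons_self)
    have hrest := fun p hp => h p (List.mem_cons_of_mem q hp)
    match q, hq with
    | op :: rest, _ =>
      by_cases h1 : op = 1
      · have h2 : 2 ≤ (op :: rest).length := hlen (Or.inl (by simp [h1]))
        match rest, h2 with
        | v :: rest', _ =>
          have ea : pvStepA arr (op :: v :: rest') = arr ++ [v] := by
            simp [pvStepA, h1]
          set s := (qs.foldr (fun q s => pvRevStep s q) (0, [])) with hs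
          have eb : pvRevStep s (op :: v :: rest') = (s.1, s.2 ++ [PySem.Int.bxor v s.1]) := by
            simp [pvRevStep, h1]
          rw [List.foldl_cons, List.foldr_cons, ea, eb, ih _ hrest]
          simp
      · by_cases h2 : op = 2
        · have h2' : 2 ≤ (op :: rest).length := hlen (Or.inr (by simp [h2]))
          match rest, h2' with
          | v :: rest', _ =>
            have ea : pvStepA arr (op :: v :: rest') = arr.map (fun a => PySem.Int.bxor a v) := by
              simp [pvStepA, h2]
            set s := (qs.foldr (fun q s => pvRevStep s q) (0, [])) with hs
            have eb : pvRevStep s (op :: v :: rest') = (PySem.Int.bxor v s.1, s.2) := by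
              simp [pvRevStep, h2]
            rw [List.foldl_cons, List.foldr_cons, ea, eb, ih _ hrest]
            simp [List.map_map, Function.comp_def, pv_bxor_assoc]
        · have ea : pvStepA arr (op :: rest) = arr := by
            simp [pvStepA, h1, h2]
          have eb : pvRevStep (qs.foldr (fun q s => pvRevStep s q) (0, [])) (op :: rest)
              = qs.foldr (fun q s => pvRevStep s q) (0, []) := by
            simp [pvRevStep, h1, h2]
          rw [List.foldl_cons, List.foldr_cons, ea, eb, ih _ hrest]

-- ===== VERDICT (by name: the statement is the Claim_ definition above) =====
theorem xorQuery_spec : Claim_equal_xorQuery := by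
  intro queries _ hpre
  unfold Spec_xorQuery xorQuery xorQuery_alt
  rw [List.foldl_reverse]
  simpa using pv_inv queries [] hpre
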